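-- pv_equiv track=rewrite | github.com/arielgindi/ariel-calculator | calculator/utils.py | simplify_signs
-- ===== SOURCE A (Python) =====
-- def simplify_signs(expr: str) -> str:
--     result: str = ""
--     i: int = 0
--     while i < len(expr):
--         c = expr[i]
--         if c in '+-':
--             start: int = i
--             while i < len(expr) and expr[i] in '+-':
--                 i += 1
--             seq: str = expr[start:i]
--             minus_count: int = seq.count('-')
--             final_sign: str = '-' if minus_count % 2 == 1 else '+'
--             result += final_sign
--             continue
--         else:
--             result += c
--         i += 1
--     return result
-- ===== SOURCE B (Python) =====
-- def simplify_signs(expr: str) -> str: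
--     out = []
--     minus = False
--     in_sign = False
--     for c in expr:
--         if c in '+-':
--             in_sign = True
--             if c == '-':
--                 minus = not minus
--         else:
--             if in_sign:
--                 out.append('-' if minus else '+')
--                 minus = False
--                 in_sign = False
--             out.append(c)
--     if in_sign:
--         out.append('-' if minus else '+')
--     return ''.join(out)
-- ===== Notes on version B (the rewrite author's own statement) =====
-- stated objective: faster
-- what changed: Replaced A's nested while loops with index arithmetic and slicing/counting of each sign run by a single flat pass maintaining two state flags (parity of '-' in the current run and whether a run is pending), flushing one sign on leaving a run.
import Mathlib
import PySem

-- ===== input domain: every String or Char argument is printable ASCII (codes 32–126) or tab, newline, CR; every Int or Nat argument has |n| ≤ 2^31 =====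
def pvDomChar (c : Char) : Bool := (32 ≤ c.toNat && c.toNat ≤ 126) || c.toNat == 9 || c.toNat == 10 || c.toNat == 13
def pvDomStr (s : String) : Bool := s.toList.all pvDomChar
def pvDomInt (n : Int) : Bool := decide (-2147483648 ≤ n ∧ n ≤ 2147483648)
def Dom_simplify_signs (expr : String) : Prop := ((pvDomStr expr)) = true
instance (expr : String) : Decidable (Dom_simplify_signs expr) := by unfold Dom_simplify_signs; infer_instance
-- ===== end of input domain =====

-- B collapses each run of '+'/'-' by a single flat state-machine pass (pending-run flag + '-' parity)
-- instead of A's nested index loops with slicing and counting; return values are identical.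

-- ===== PORT A =====
-- A's outer while over index i: each step either consumes a whole sign run (the inner while,
-- here takeWhile/dropWhile on the same predicate) appending its collapsed sign, or one plain char.
def pvSignPred (c : Char) : Bool := c == '+' || c == '-'

def pvGoA (cs : List Char) (result : List Char) : List Char :=
  match cs with
  | [] => result
  | c :: rest =>
    if pvSignPred c then
      let seq := (c :: rest).takeWhile pvSignPred
      let rest' := (c :: rest).dropWhile pvSignPred
      pvGoA rest' (result ++ [if seq.count '-' % 2 = 1 then '-' else '+'])
    else
      pvGoA rest (result ++ [c])
termination_by cs.length
decreasing_by
  · simp_all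
    exact List.length_dropWhile_le _ _
  · simp

def simplify_signs (expr : String) : String := String.mk (pvGoA expr.toList [])

-- ===== PORT B =====
-- one pass; state = (out, minus, in_sign)

def pvStepB (st : List Char × Bool × Bool) (c : Char) : List Char × Bool × Bool :=
  let (out, minus, inSign) := st
  if pvSignPred c then
    (out, (if c == '-' then !minus else minus), true)
  else
    if inSign then (out ++ [if minus then '-' else '+'] ++ [c], false, false)
    else (out ++ [c], minus, false)

def pvFlushB (st : List Char × Bool × Bool) : List Char :=
  if st.2.2 then st.1 ++ [if st.2.1 then '-' else '+'] else st.1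

def simplify_signs_alt (expr : String) : String :=
  String.mk (pvFlushB (expr.toList.foldl pvStepB ([], false, false)))

-- ===== PRECONDITION & SPEC =====
def Spec_simplify_signs (expr : String) (out : String) : Prop := out = simplify_signs_alt expr
instance (expr : String) (out : String) : Decidable (Spec_simplify_signs expr out) := by unfold Spec_simplify_signs; infer_instance

-- ===== CLAIM (what is proved, stated in full; the proofs are below) =====
def Claim_equal_simplify_signs : Prop := ∀ (expr : String), Dom_simplify_signs expr → Spec_simplify_signs expr (simplify_signs expr)

-- ===== LEMMAS AND PROOFS =====

-- folding B's step over a nonempty all-sign run only flips the parity flag and raises in_sign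
lemma pv_fold_run (seq : List Char) (hne : seq ≠ []) (hall : ∀ c ∈ seq, pvSignPred c = true)
    (acc : List Char) (m s : Bool) :
    seq.foldl pvStepB (acc, m, s) = (acc, xor m (decide (seq.count '-' % 2 = 1)), true) := by
  induction seq generalizing m s with
  | nil => simp at hne
  | cons c t ih =>
    have hc := hall c (by simp)
    by_cases hct : t = []
    · subst hct
      simp [pvStepB, pvSignPred, hc, List.count_cons]
      rcases (by simpa [pvSignPred] using hc) with h | h <;> simp [h]
    · have hallt : ∀ x ∈ t, pvSignPred x = true := fun x hx => hall x (by simp [hx])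
      rcases (by simpa [pvSignPred] using hc) with h | h
      · subst h
        simp [List.foldl_cons, pvStepB, pvSignPred, pvSignPred, ih hct hallt]
      · subst h
        simp [List.foldl_cons, pvStepB, pvSignPred, pvSignPred, ih hct hallt]
        have : (t.count '-' + 1) % 2 = 1 ↔ ¬ (t.count '-' % 2 = 1) := by omega
        rcases Nat.mod_two_eq_zero_or_one (t.count '-') with h2 | h2 <;>
          simp [h2, this]

-- with a pending sign run, flushing commutes with first appending the collapsed sign,
-- provided the remaining input does not start with a sign character
lemma pv_resume (rest : List Char) (hhd : ∀ d, rest.head? = some d → pvSignPred d = false)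
    (acc : List Char) (m : Bool) :
    pvFlushB (rest.foldl pvStepB (acc, m, true)) =
    pvFlushB (rest.foldl pvStepB (acc ++ [if m then '-' else '+'], false, false)) := by
  cases rest with
  | nil => simp [pvFlushB]
  | cons d ds =>
    have hd := hhd d (by simp)
    simp [List.foldl_cons, pvStepB, hd]

-- main invariant: A's run-at-a-time loop equals B's flushed fold, for any accumulator
lemma pv_main (n : Nat) : ∀ (cs : List Char), cs.length ≤ n → ∀ (acc : List Char),
    pvGoA cs acc = pvFlushB (cs.foldl pvStepB (acc, false, false)) := by
  induction n with
  | zero =>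
    intro cs hlen acc
    have : cs = [] := List.eq_nil_of_length_eq_zero (Nat.le_zero.mp hlen)
    subst this
    simp [pvGoA, pvFlushB]
  | succ n ih =>
    intro cs hlen acc
    match cs with
    | [] => simp [pvGoA, pvFlushB]
    | c :: rest =>
      by_cases hc : pvSignPred c = true
      · rw [pvGoA]
        simp only [hc, if_true]
        set seq := (c :: rest).takeWhile pvSignPred with hseq
        set rest' := (c :: rest).dropWhile pvSignPred with hrest'
        have hsplit : seq ++ rest' = c :: rest := List.takeWhile_append_dropWhile
        have hne : seq ≠ [] := by
          simp [hseq, hc]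
        have hall : ∀ x ∈ seq, pvSignPred x = true := fun x hx => List.mem_takeWhile_imp hx
        have hhd : ∀ d, rest'.head? = some d → pvSignPred d = false := by
          intro d hd
          have := List.head?_dropWhile_not pvSignPred (c :: rest)
          rw [← hrest'] at this
          cases hh : rest'.head? with
          | none => simp [hh] at hd
          | some e =>
            rw [hh] at this hd
            cases hd
            simpa using this
        have hlen' : rest'.length ≤ n := by
          have h1 : rest'.length < (c :: rest).length := by
            have : rest' = rest.dropWhile pvSignPred := by
              simp [hrest', hc]
            rw [this]
            exact Nat.lt_succ_of_le (List.length_dropWhile_le _ _)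
          omega
        rw [ih rest' hlen']
        have hfold : (c :: rest).foldl pvStepB (acc, false, false) =
            rest'.foldl pvStepB (acc, decide (seq.count '-' % 2 = 1), true) := by
          rw [← hsplit, List.foldl_append, pv_fold_run seq hne hall acc false false]
          simp
        rw [hfold, pv_resume rest' hhd acc _]
        congr 2
        rcases Nat.mod_two_eq_zero_or_one (seq.count '-') with h2 | h2 <;> simp [h2]
      · rw [pvGoA]
        simp only [hc]
        rw [ih rest (by simpa using Nat.lt_succ_iff.mp (by simpa using hlen)) (acc ++ [c])]
        have hc' : pvSignPred c = false := by simp_all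
        simp [List.foldl_cons, pvStepB, hc']

-- ===== VERDICT (by name: the statement is the Claim_ definition above) =====
theorem simplify_signs_spec : Claim_equal_simplify_signs := by
  intro expr _
  unfold Spec_simplify_signs simplify_signs simplify_signs_alt
  rw [pv_main expr.toList.length expr.toList le_rfl []]
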